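-- pv_equiv track=rewrite | github.com/wiesiupolaczek/MyFiles | 81/Bjgle/mian.py | clues
-- ===== SOURCE A (Python) =====
-- def clues(guess,secretnumber):
--     if guess == secretnumber:
--         return "Udalo sie"
--
--     clue=[]
--     for i in range(len(guess)):
--         if guess[i] == secretnumber[i]:
--             clue.append("Fermi")
--         elif guess[i] in secretnumber:
--             clue.append("Piko")
--
--     if len(clue) == 0:
--         return "Bajgle"
--     else:
--         clue.sort()
--         return " ".join(clue)
-- ===== SOURCE B (Python) =====
-- def clues(guess, secretnumber):
--     if guess == secretnumber:
--         return "Udalo sie"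
--     members = set(secretnumber)
--     fermi = sum(a == b for a, b in zip(guess, secretnumber))
--     inset = sum(c in members for c in guess)
--     if inset == 0:
--         return "Bajgle"
--     piko = inset - fermi
--     return " ".join(["Fermi"] * fermi + ["Piko"] * piko)
-- ===== Notes on version B (the rewrite author's own statement) =====
-- stated objective: alternative
-- what changed: B drops A's per-position elif classification, clue list and sort: it takes two independent aggregate counts (positional matches over zip, and characters of guess present in set(secretnumber)), derives the Piko count arithmetically as inset - fermi (a match is always a member), and builds the grouped output directly from the two counts.
import Mathlib
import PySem

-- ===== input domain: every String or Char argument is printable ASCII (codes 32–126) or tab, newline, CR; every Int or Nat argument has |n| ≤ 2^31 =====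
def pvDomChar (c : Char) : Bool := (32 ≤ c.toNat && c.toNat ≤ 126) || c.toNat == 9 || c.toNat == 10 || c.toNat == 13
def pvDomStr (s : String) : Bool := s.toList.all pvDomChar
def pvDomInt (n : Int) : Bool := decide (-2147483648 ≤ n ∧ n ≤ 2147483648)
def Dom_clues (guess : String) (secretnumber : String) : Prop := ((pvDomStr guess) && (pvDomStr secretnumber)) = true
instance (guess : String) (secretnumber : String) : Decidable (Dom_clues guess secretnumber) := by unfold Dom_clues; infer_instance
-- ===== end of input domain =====

-- B replaces A's per-position elif classification + clue list + sort with two independent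
-- aggregate counts (zip-equality matches and set-membership hits) and derives the Piko count
-- arithmetically as inset - fermi; objective: alternative (no clue list, no sort).


-- ===== PORT A =====
-- range(len(guess)) is a foldl over List.range; indices are in range for guess always and for
-- secretnumber under Pre_, so getD is exact there. `guess[i] in secretnumber` with a single
-- character is exactly character membership.
def cluesLoopA (g s : List Char) : List String :=
  (List.range g.length).foldl
    (fun acc i =>
      if g.getD i ' ' = s.getD i ' ' then acc ++ ["Fermi"]
      else if s.contains (g.getD i ' ') then acc ++ ["Piko"]
      else acc) []

def clues (guess : String) (secretnumber : String) : String :=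
  if guess = secretnumber then "Udalo sie"
  else
    let clue := cluesLoopA guess.toList secretnumber.toList
    if clue.length = 0 then "Bajgle"
    else PySem.Str.join " " (PySem.List.sorted clue (fun x => x) false)

-- ===== PORT B =====
-- sum over a generator of booleans counts the True cases: ported as a sum of 0/1 indicators.
def clues_alt (guess : String) (secretnumber : String) : String :=
  if guess = secretnumber then "Udalo sie"
  else
    let members := PySem.Set.ofList secretnumber.toList
    let fermi := ((guess.toList.zip secretnumber.toList).map
        (fun p => if p.1 = p.2 then (1 : Nat) else 0)).sum
    let inset := (guess.toList.map
        (fun c => if members.contains c then (1 : Nat) else 0)).sum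
    if inset = 0 then "Bajgle"
    else
      let piko := inset - fermi
      PySem.Str.join " " (List.replicate fermi "Fermi" ++ List.replicate piko "Piko")

-- ===== PRECONDITION & SPEC =====
-- Python A raises IndexError at secretnumber[i] when guess is longer than secretnumber; exactly those inputs are excluded.
def Pre_clues (guess : String) (secretnumber : String) : Prop :=
  guess.toList.length ≤ secretnumber.toList.length
instance (guess : String) (secretnumber : String) : Decidable (Pre_clues guess secretnumber) := by unfold Pre_clues; infer_instance
def pvWitness_clues : String × String := ("12", "21")

def Spec_clues (guess : String) (secretnumber : String) (out : String) : Prop := out = clues_alt guess secretnumber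
instance (guess : String) (secretnumber : String) (out : String) : Decidable (Spec_clues guess secretnumber out) := by unfold Spec_clues; infer_instance

-- ===== CLAIM (what is proved, stated in full; the proofs are below) =====
def Claim_equal_clues : Prop := ∀ (guess : String) (secretnumber : String), Dom_clues guess secretnumber → Pre_clues guess secretnumber → Spec_clues guess secretnumber (clues guess secretnumber)

-- ===== LEMMAS AND PROOFS =====

-- A's loop state is append-only, so over any index list it produces a flatMap of per-index tags.
def cluesTag (g s : List Char) (i : Nat) : List String :=
  if g.getD i ' ' = s.getD i ' ' then ["Fermi"]
  else if s.contains (g.getD i ' ') then ["Piko"]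
  else []

theorem cluesLoopA_eq_flatMap (g s : List Char) (l : List Nat) (acc : List String) :
    l.foldl (fun acc i =>
      if g.getD i ' ' = s.getD i ' ' then acc ++ ["Fermi"]
      else if s.contains (g.getD i ' ') then acc ++ ["Piko"]
      else acc) acc = acc ++ l.flatMap (cluesTag g s) := by
  induction l generalizing acc with
  | nil => simp
  | cons i t ih =>
    rw [List.foldl_cons, List.flatMap_cons]
    have hstep : (if g.getD i ' ' = s.getD i ' ' then acc ++ ["Fermi"]
        else if s.contains (g.getD i ' ') then acc ++ ["Piko"] else acc)
        = acc ++ cluesTag g s i := by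
      unfold cluesTag; split_ifs <;> simp
    rw [hstep, ih, List.append_assoc]

theorem cluesTag_fermi (g s : List Char) (i : Nat) (h : g.getD i ' ' = s.getD i ' ') :
    cluesTag g s i = ["Fermi"] := by unfold cluesTag; rw [if_pos h]

theorem cluesTag_piko (g s : List Char) (i : Nat) (h1 : ¬ g.getD i ' ' = s.getD i ' ')
    (h2 : s.contains (g.getD i ' ')) : cluesTag g s i = ["Piko"] := by
  unfold cluesTag; rw [if_neg h1, if_pos h2]

theorem cluesTag_none (g s : List Char) (i : Nat) (h1 : ¬ g.getD i ' ' = s.getD i ' ')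
    (h2 : ¬ s.contains (g.getD i ' ') = true) : cluesTag g s i = [] := by
  unfold cluesTag; rw [if_neg h1, if_neg h2]

-- the two tag counts, expressed as sums of per-index indicators; a positional match is always a
-- member (for an in-range index), so Fermi + Piko = membership hits.
theorem counts_flat (g s : List Char) (l : List Nat) (h : ∀ i ∈ l, i < s.length) :
    ((l.flatMap (cluesTag g s)).count "Fermi"
      = (l.map (fun i => if g.getD i ' ' = s.getD i ' ' then (1 : Nat) else 0)).sum)
    ∧ ((l.flatMap (cluesTag g s)).count "Fermi" + (l.flatMap (cluesTag g s)).count "Piko"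
      = (l.map (fun i => if s.contains (g.getD i ' ') then (1 : Nat) else 0)).sum) := by
  induction l with
  | nil => simp
  | cons i t ih =>
    have hi : i < s.length := h i (by simp)
    obtain ⟨ih1, ih2⟩ := ih (fun j hj => h j (by simp [hj]))
    have cFF : (["Fermi"] : List String).count "Fermi" = 1 := by decide
    have cFP : (["Fermi"] : List String).count "Piko" = 0 := by decide
    have cPF : (["Piko"] : List String).count "Fermi" = 0 := by decide
    have cPP : (["Piko"] : List String).count "Piko" = 1 := by decide
    rw [List.flatMap_cons]
    by_cases h1 : g.getD i ' ' = s.getD i ' '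
    · have hmem : s.contains (g.getD i ' ') = true := by
        rw [h1, List.getD_eq_getElem s ' ' hi]
        simp
      rw [cluesTag_fermi g s i h1]
      refine ⟨?_, ?_⟩
      · rw [List.count_append, cFF, List.map_cons, List.sum_cons, if_pos h1, ih1]
      · simp only [List.count_append]
        rw [cFF, cFP, List.map_cons, List.sum_cons, if_pos hmem]
        omega
    · by_cases h2 : s.contains (g.getD i ' ') = true
      · rw [cluesTag_piko g s i h1 h2]
        refine ⟨?_, ?_⟩
        · rw [List.count_append, cPF, List.map_cons, List.sum_cons, if_neg h1, ih1]
        · simp only [List.count_append]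
          rw [cPF, cPP, List.map_cons, List.sum_cons, if_pos h2]
          omega
      · rw [cluesTag_none g s i h1 h2]
        refine ⟨?_, ?_⟩
        · rw [List.nil_append, List.map_cons, List.sum_cons, if_neg h1, ih1]
          omega
        · rw [List.nil_append, List.map_cons, List.sum_cons, if_neg h2]
          omega

-- B's zip-sum equals the index-wise equality sum (zip does not truncate when g is no longer than s).
theorem zip_sum_eq (g s : List Char) (h : g.length ≤ s.length) :
    ((g.zip s).map (fun p => if p.1 = p.2 then (1 : Nat) else 0)).sum
      = ((List.range g.length).map
          (fun i => if g.getD i ' ' = s.getD i ' ' then (1 : Nat) else 0)).sum := by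
  induction g generalizing s with
  | nil => simp
  | cons a g' ih =>
    cases s with
    | nil => simp at h
    | cons b s' =>
      simp only [List.length_cons, List.range_succ_eq_map, List.map_cons, List.map_map,
        List.zip_cons_cons, List.sum_cons]
      rw [ih s' (by simpa using h)]
      exact congrArg (HAdd.hAdd _) (congrArg List.sum (List.map_congr_left
        (fun i _ => by simp [List.getElem?_cons_succ])))

-- B's membership sum equals the index-wise membership sum.
theorem mem_sum_eq (g s : List Char) :
    (g.map (fun c => if (PySem.Set.ofList s).contains c then (1 : Nat) else 0)).sum
      = ((List.range g.length).map
          (fun i => if s.contains (g.getD i ' ') then (1 : Nat) else 0)).sum := by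
  have hset : ∀ c : Char, (PySem.Set.ofList s).contains c = s.contains c := by
    intro c; simp [PySem.Set.mem_ofList]
  induction g with
  | nil => simp
  | cons a g' ih =>
    simp only [List.length_cons, List.range_succ_eq_map, List.map_cons, List.map_map,
      List.sum_cons]
    rw [hset a, ih]
    exact congrArg (HAdd.hAdd _) (congrArg List.sum (List.map_congr_left
      (fun i _ => by simp [List.getElem?_cons_succ])))

-- the tag list is a permutation of the grouped Fermi's-then-Piko's list built from the counts
theorem flatMap_tag_perm (g s : List Char) (l : List Nat) :
    (l.flatMap (cluesTag g s)).Perm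
      (List.replicate ((l.flatMap (cluesTag g s)).count "Fermi") "Fermi"
       ++ List.replicate ((l.flatMap (cluesTag g s)).count "Piko") "Piko") := by
  induction l with
  | nil => simp
  | cons i t ih =>
    rw [List.flatMap_cons]
    by_cases h1 : g.getD i ' ' = s.getD i ' '
    · rw [cluesTag_fermi g s i h1]
      simp only [List.singleton_append, List.count_cons]
      simpa [List.replicate_succ] using ih.cons "Fermi"
    · by_cases h2 : s.contains (g.getD i ' ') = true
      · rw [cluesTag_piko g s i h1 h2]
        simp only [List.singleton_append, List.count_cons]
        refine (ih.cons "Piko").trans ?_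
        simpa [List.replicate_succ] using (List.perm_middle
          (a := "Piko") (l₁ := List.replicate ((t.flatMap (cluesTag g s)).count "Fermi") "Fermi")
          (l₂ := List.replicate ((t.flatMap (cluesTag g s)).count "Piko") "Piko")).symm
      · rw [cluesTag_none g s i h1 h2]
        simpa using ih

theorem grouped_pairwise (f p : Nat) :
    (List.replicate f "Fermi" ++ List.replicate p "Piko").Pairwise (fun a b => a ≤ b) := by
  apply List.pairwise_append.mpr
  refine ⟨List.pairwise_replicate.mpr (Or.inr (le_refl _)),
          List.pairwise_replicate.mpr (Or.inr (le_refl _)), ?_⟩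
  intro x hx y hy
  rw [List.eq_of_mem_replicate hx, List.eq_of_mem_replicate hy]
  exact le_of_lt (by rw [String.lt_iff_toList_lt]; decide)

-- ===== VERDICT (by name: the statement is the Claim_ definition above) =====
theorem clues_spec : Claim_equal_clues := by
  intro guess secretnumber _ hpre
  unfold Spec_clues clues clues_alt
  by_cases hEq : guess = secretnumber
  · simp [hEq]
  · simp only [if_neg hEq]
    have hlen : guess.toList.length ≤ secretnumber.toList.length := hpre
    have hA : cluesLoopA guess.toList secretnumber.toList
        = (List.range guess.toList.length).flatMap (cluesTag guess.toList secretnumber.toList) := by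
      unfold cluesLoopA; rw [cluesLoopA_eq_flatMap]; simp
    obtain ⟨hF, hFP⟩ := counts_flat guess.toList secretnumber.toList
      (List.range guess.toList.length)
      (fun i hi => lt_of_lt_of_le (List.mem_range.mp hi) hlen)
    have hperm := flatMap_tag_perm guess.toList secretnumber.toList
      (List.range guess.toList.length)
    have hlenA : (cluesLoopA guess.toList secretnumber.toList).length
        = ((List.range guess.toList.length).flatMap
            (cluesTag guess.toList secretnumber.toList)).count "Fermi"
          + ((List.range guess.toList.length).flatMap
              (cluesTag guess.toList secretnumber.toList)).count "Piko" := by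
      rw [hA, hperm.length_eq]; simp
    rw [zip_sum_eq guess.toList secretnumber.toList hlen,
        mem_sum_eq guess.toList secretnumber.toList, ← hF, ← hFP]
    by_cases hz : (cluesLoopA guess.toList secretnumber.toList).length = 0
    · rw [if_pos hz, if_pos (by omega)]
    · rw [if_neg hz, if_neg (by omega)]
      congr 1
      rw [Nat.add_sub_cancel_left]
      exact PySem.List.sorted_id_eq_of_perm_of_pairwise _ _
        (by rw [hA]; exact hperm.symm) (grouped_pairwise _ _)
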